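-- pv_equiv track=rewrite | github.com/abusalimov/commitsan | commitsan/checks/msg.py | verb_forms
-- ===== SOURCE A (Python) =====
-- def verb_forms(s):
--     """
--     From a given verb makes 4-element tuple of:
--         infinitive: The verb itself
--                 -s: The third form
--               -ing: Continuous tense
--                -ed: Past simple tense
--         """
--     words = s.split()
--     verb = words.pop(0)
--     third = cont = past = None
--
--     if verb[-1] == '^':
--         verb = verb[:-1]
--         cont = past = verb + verb[-1]  # stop-s   # stop-P-ing # stop-P-ed
--     elif verb[-1] == 'e':
--         cont = past = verb[:-1]        # merge-s  # merg-ing   # merg-ed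
--     elif verb[-1] in 'sxz' or verb[-2:] in ('ch', 'sh'):
--         third = verb + 'e'             # fix-e-s  # fix-ing    # fix-ed
--     elif verb[-1] == 'y':
--         third = verb[:-1] + 'ie'       # tr-ie-s  # try-ing    # tr-i-ed
--         past = verb[:-1] + 'i'
--
--     return tuple(' '.join([form] + words)
--                  for form in ((verb),
--                               (third or verb) + 's',
--                               (cont or verb) + 'ing',
--                               (past or verb) + 'ed'))
-- ===== SOURCE B (Python) =====
-- # Data-driven rewrite engine: one first-match suffix-rule table per form,
-- # applied by a single generic _rewrite scan ('@' in a replacement = double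
-- # the preceding character, like a regex backreference).
-- RULES = {
--     '':    [('^', '')],
--     's':   [('^', 's'), ('e', 'es'), ('s', 'ses'), ('x', 'xes'), ('z', 'zes'),
--             ('ch', 'ches'), ('sh', 'shes'), ('y', 'ies')],
--     'ing': [('^', '@ing'), ('e', 'ing')],
--     'ed':  [('^', '@ed'), ('e', 'ed'), ('y', 'ied')],
-- }
--
-- def _rewrite(verb, suffix):
--     for ending, repl in RULES[suffix]:
--         if verb.endswith(ending):
--             base = verb[:len(verb) - len(ending)]
--             if repl.startswith('@'):
--                 repl = base[-1] + repl[1:]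
--             return base + repl
--     return verb + suffix
--
-- def verb_forms(s):
--     """Four verb forms via a generic first-match suffix-rewrite table."""
--     words = s.split()
--     verb, rest = words[0], words[1:]
--     return tuple(' '.join([_rewrite(verb, suf)] + rest)
--                  for suf in ('', 's', 'ing', 'ed'))
-- ===== Notes on version B (the rewrite author's own statement) =====
-- stated objective: alternative
-- what changed: B replaces A's hard-coded branch chain with shared Optional state by a data-driven rewrite engine: one first-match (ending, replacement) rule table per form, applied by a single generic scanning function ('@' marks consonant doubling for the caret sentinel).
-- intended difference: On inputs whose first word is exactly the single letter e, A's or-fallback treats the computed empty stem as falsy and falls back to the whole verb, returning (e, es, eing, eed); B returns (e, es, ing, ed), the intended result of the drop-trailing-e rule. — e.g. on verb_forms("e"): A returns ("e", "es", "eing", "eed"), B returns ("e", "es", "ing", "ed")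
import Mathlib
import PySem

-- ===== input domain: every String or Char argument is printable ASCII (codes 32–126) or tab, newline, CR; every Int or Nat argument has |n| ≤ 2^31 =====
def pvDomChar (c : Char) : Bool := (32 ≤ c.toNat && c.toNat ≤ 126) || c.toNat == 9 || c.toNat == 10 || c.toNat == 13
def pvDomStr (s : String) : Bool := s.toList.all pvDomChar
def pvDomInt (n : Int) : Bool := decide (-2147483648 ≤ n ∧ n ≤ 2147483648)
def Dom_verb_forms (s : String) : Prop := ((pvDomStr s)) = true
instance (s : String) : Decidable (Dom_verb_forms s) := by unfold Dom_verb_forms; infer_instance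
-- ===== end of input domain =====

-- B replaces A's branch chain (shared third/cont/past Optional state plus or-fallbacks) by a
-- data-driven first-match suffix-rewrite rule table applied by one generic scan — objective:
-- alternative, not faster.
-- ' '.join([form] + words), shared output step of both programs
def pvJoin (f : List Char) (ws : List (List Char)) : String :=
  String.ofList (PySem.Chars.join [' '] (f :: ws))

-- ===== PORT A =====
-- Python 'x or b' on an Optional[str] x: None and '' are falsy
def pvOr (a : Option (List Char)) (b : List Char) : List Char :=
  match a with
  | some x => if x = [] then b else x
  | none => b

def verb_forms (s : String) : String × String × String × String :=
  match PySem.Chars.split₀ s.toList with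
  | [] => ("", "", "", "")          -- words.pop(0): IndexError, excluded by Pre_
  | verb :: words =>
    match PySem.List.pyGet? verb (-1) with
    | none => ("", "", "", "")      -- unreachable: split() yields nonempty words
    | some c =>
      let st : Option (List Char × Option (List Char) × Option (List Char) × Option (List Char)) :=
        if c = '^' then
          let v := PySem.List.slice verb none (some (-1))
          match PySem.List.pyGet? v (-1) with
          | none => none            -- verb was '^': re-read verb[-1] raises IndexError, excluded by Pre_
          | some d => some (v, none, some (v ++ [d]), some (v ++ [d]))
        else if c = 'e' then
          some (verb, none, some (PySem.List.slice verb none (some (-1))),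
                some (PySem.List.slice verb none (some (-1))))
        else if c ∈ (['s','x','z'] : List Char)
             ∨ PySem.List.slice verb (some (-2)) none = ['c','h']
             ∨ PySem.List.slice verb (some (-2)) none = ['s','h'] then
          some (verb, some (verb ++ ['e']), none, none)
        else if c = 'y' then
          some (verb, some (PySem.List.slice verb none (some (-1)) ++ ['i','e']), none,
                some (PySem.List.slice verb none (some (-1)) ++ ['i']))
        else some (verb, none, none, none)
      match st with
      | none => ("", "", "", "")
      | some (v, third, cont, past) =>
        (pvJoin v words,
         pvJoin (pvOr third v ++ ['s']) words,
         pvJoin (pvOr cont v ++ ['i','n','g']) words,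
         pvJoin (pvOr past v ++ ['e','d']) words)

-- ===== PORT B =====
-- the RULES table of Source B: per suffix, an ordered list of (ending, replacement) pairs
def pvRules (suf : List Char) : List (List Char × List Char) :=
  if suf = [] then [(['^'], [])]
  else if suf = ['s'] then
    [(['^'], ['s']), (['e'], ['e','s']), (['s'], ['s','e','s']), (['x'], ['x','e','s']),
     (['z'], ['z','e','s']), (['c','h'], ['c','h','e','s']), (['s','h'], ['s','h','e','s']),
     (['y'], ['i','e','s'])]
  else if suf = ['i','n','g'] then
    [(['^'], ['@','i','n','g']), (['e'], ['i','n','g'])]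
  else
    [(['^'], ['@','e','d']), (['e'], ['e','d']), (['y'], ['i','e','d'])]

-- _rewrite of Source B: scan the rule list, first matching ending wins; '@' doubles base[-1];
-- none = the IndexError base[-1] raises when the base is empty (lone '^'), excluded by Pre_
def pvRewrite (verb : List Char) (rules : List (List Char × List Char)) (suf : List Char) :
    Option (List Char) :=
  match rules with
  | [] => some (verb ++ suf)
  | (ending, repl) :: rest =>
    if PySem.Chars.endswith verb ending then
      let base := verb.take (verb.length - ending.length)
      match repl with
      | '@' :: r =>
        match PySem.List.pyGet? base (-1) with
        | none => none
        | some d => some (base ++ d :: r)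
      | _ => some (base ++ repl)
    else pvRewrite verb rest suf

def verb_forms_alt (s : String) : String × String × String × String :=
  match PySem.Chars.split₀ s.toList with
  | [] => ("", "", "", "")          -- words[0]: IndexError, excluded by Pre_
  | verb :: rest =>
    match pvRewrite verb (pvRules []) [], pvRewrite verb (pvRules ['s']) ['s'],
          pvRewrite verb (pvRules ['i','n','g']) ['i','n','g'],
          pvRewrite verb (pvRules ['e','d']) ['e','d'] with
    | some f1, some f2, some f3, some f4 =>
      (pvJoin f1 rest, pvJoin f2 rest, pvJoin f3 rest, pvJoin f4 rest)
    | _, _, _, _ => ("", "", "", "")  -- IndexError on lone '^', excluded by Pre_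

-- ===== PRECONDITION & SPEC =====
-- Pre_ excludes exactly the inputs where the Python A raises IndexError:
-- a string with no words (the pop of the first word) and a first word that is just the caret
-- sentinel (re-reading the last character after stripping it).
def Pre_verb_forms (s : String) : Prop :=
  PySem.Chars.split₀ s.toList ≠ [] ∧ (PySem.Chars.split₀ s.toList).headI ≠ ['^']
instance (s : String) : Decidable (Pre_verb_forms s) := by unfold Pre_verb_forms; infer_instance
def pvWitness_verb_forms : String := "stop^ it"

-- On inputs whose first word is exactly the single letter e, A's or-fallback treats the computed
-- empty stem as falsy and falls back to the whole verb, returning (e, es, eing, eed), while B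
-- returns (e, es, ing, ed), the intended result of the drop-trailing-e rule.
def D_verb_forms (s : String) : Prop := (PySem.Chars.split₀ s.toList).headI = ['e']
instance (s : String) : Decidable (D_verb_forms s) := by unfold D_verb_forms; infer_instance

def Spec_verb_forms (s : String) (out : String × String × String × String) : Prop :=
  ¬ D_verb_forms s → out = verb_forms_alt s
instance (s : String) (out : String × String × String × String) : Decidable (Spec_verb_forms s out) := by
  unfold Spec_verb_forms; infer_instance

def pvDiffWitness_verb_forms : String := "e"
def pvDiffWitnessOut_verb_forms :
    (String × String × String × String) × (String × String × String × String) :=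
  (("e", "es", "eing", "eed"), ("e", "es", "ing", "ed"))

-- ===== CLAIM (what is proved, stated in full; the proofs are below) =====
def Claim_unchanged_verb_forms : Prop :=
  ∀ (s : String), Dom_verb_forms s → Pre_verb_forms s → Spec_verb_forms s (verb_forms s)
def Claim_changed_verb_forms : Prop :=
  Dom_verb_forms (pvDiffWitness_verb_forms) ∧ Pre_verb_forms (pvDiffWitness_verb_forms) ∧
  D_verb_forms (pvDiffWitness_verb_forms) ∧
  verb_forms (pvDiffWitness_verb_forms) = pvDiffWitnessOut_verb_forms.1 ∧
  verb_forms_alt (pvDiffWitness_verb_forms) = pvDiffWitnessOut_verb_forms.2 ∧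
  pvDiffWitnessOut_verb_forms.1 ≠ pvDiffWitnessOut_verb_forms.2
def Claim_exact_verb_forms : Prop :=
  ∀ (s : String), Dom_verb_forms s → Pre_verb_forms s → D_verb_forms s →
    verb_forms s ≠ verb_forms_alt s

-- ===== LEMMAS AND PROOFS =====

-- s.split() never yields an empty word
lemma split0_go_ne_nil (l cur : List Char) (acc : List (List Char)) (hacc : ∀ w ∈ acc, w ≠ []) :
    ∀ w ∈ PySem.Chars.split₀.go l cur acc, w ≠ [] := by
  induction l generalizing cur acc with
  | nil =>
    intro w hw
    rw [PySem.Chars.split₀.go] at hw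
    split_ifs at hw with h
    · simp at hw; exact hacc w hw
    · simp at hw
      rcases hw with hw | hw
      · exact hacc w hw
      · subst hw; simpa [List.isEmpty_iff] using h
  | cons c rest ih =>
    intro w hw
    rw [PySem.Chars.split₀.go] at hw
    split_ifs at hw with h1 h2
    · exact ih [] acc hacc w hw
    · refine ih [] _ ?_ w hw
      intro u hu
      rcases List.mem_cons.mp hu with rfl | hu
      · simpa [List.isEmpty_iff] using h2
      · exact hacc u hu
    · exact ih (c :: cur) acc hacc w hw

lemma split0_ne_nil (l : List Char) : ∀ w ∈ PySem.Chars.split₀ l, w ≠ [] :=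
  split0_go_ne_nil l [] [] (by simp)

lemma endswith_suffix_iff (l p : List Char) : PySem.Chars.endswith l p = true ↔ p <:+ l := by
  simp [PySem.Chars.endswith, List.isSuffixOf_iff_suffix]

-- a 1-character suffix test is a test on the last character
lemma endswith_singleton (l : List Char) (c : Char) :
    PySem.Chars.endswith l [c] = decide (l.getLast? = some c) := by
  by_cases hg : l.getLast? = some c
  · have hsuf : [c] <:+ l := ⟨l.dropLast, List.dropLast_append_getLast? c hg⟩
    rw [(endswith_suffix_iff _ _).mpr hsuf]
    simp [hg]
  · have hsuf : ¬ [c] <:+ l := by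
      rintro ⟨t, rfl⟩
      exact hg (by simp)
    have hf : PySem.Chars.endswith l [c] = false := by
      rcases h' : PySem.Chars.endswith l [c] with _ | _
      · rfl
      · exact absurd ((endswith_suffix_iff _ _).mp h') hsuf
    simp [hf, hg]

-- a 2-character suffix test: Python's verb[-2:] == p is 'verb ends with p'
lemma drop_sub_two_eq_iff (l p : List Char) (hp : p.length = 2) :
    l.drop (l.length - 2) = p ↔ p <:+ l := by
  constructor
  · intro h; rw [← h]; exact List.drop_suffix _ _
  · rintro ⟨t, rfl⟩
    have : (t ++ p).length - 2 = t.length := by simp [hp]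
    rw [this, List.drop_left]

lemma slice_neg_two_eq_iff (v p : List Char) (hp : p.length = 2) :
    PySem.List.slice v (some (-2)) none = p ↔ PySem.Chars.endswith v p = true := by
  rw [PySem.List.slice_from_neg_ofNat v 2 (by omega), endswith_suffix_iff,
     drop_sub_two_eq_iff _ _ hp]

lemma slice_two_ch (v : List Char) :
    (PySem.List.slice v (some (-2)) none = ['c','h']) = (PySem.Chars.endswith v ['c','h'] = true) := by
  rw [eq_iff_iff]; exact slice_neg_two_eq_iff v _ rfl

lemma slice_two_sh (v : List Char) :
    (PySem.List.slice v (some (-2)) none = ['s','h']) = (PySem.Chars.endswith v ['s','h'] = true) := by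
  rw [eq_iff_iff]; exact slice_neg_two_eq_iff v _ rfl

-- verb[:len(verb)-1] is dropLast
lemma take_sub_one (l : List Char) : l.take (l.length - 1) = l.dropLast :=
  List.dropLast_eq_take.symm

-- rewriting by a matching rule whose replacement starts with its own ending just appends the tail
lemma take_endswith (v p r : List Char) (h : p <:+ v) :
    v.take (v.length - p.length) ++ (p ++ r) = v ++ r := by
  rcases h with ⟨t, rfl⟩
  have hl : (t ++ p).length - p.length = t.length := by simp
  rw [hl, List.take_left, List.append_assoc]

lemma getLast?_of_endswith2 (l : List Char) (c d : Char)
    (h : PySem.Chars.endswith l [c, d] = true) : l.getLast? = some d := by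
  rcases (endswith_suffix_iff _ _).mp h with ⟨t, rfl⟩
  rw [show t ++ [c, d] = (t ++ [c]) ++ [d] by simp]
  simp

lemma dropLast_ne_nil (l : List Char) (c : Char) (hl : l.getLast? = some c)
    (h : l ≠ [c]) : l.dropLast ≠ [] := by
  intro hd
  have hv := List.dropLast_append_getLast? c hl
  rw [hd] at hv
  exact h hv.symm

lemma core (s : String) (v : List Char) (ws : List (List Char))
    (hs : PySem.Chars.split₀ s.toList = v :: ws) (h2 : v ≠ ['e']) :
    verb_forms s = verb_forms_alt s := by
  have hv0 : v ≠ [] := split0_ne_nil s.toList v (by rw [hs]; exact List.mem_cons_self)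
  unfold verb_forms verb_forms_alt
  rw [hs]
  simp only [PySem.List.pyGet?_neg_one]
  rcases hl : v.getLast? with _ | a
  · exact absurd (List.getLast?_eq_none_iff.mp hl) hv0
  · have hvd : v.dropLast ++ [a] = v := List.dropLast_append_getLast? a hl
    by_cases hc : a = '^'
    · subst hc
      have hw : PySem.Chars.endswith v ['^'] = true := by simp [endswith_singleton, hl]
      rcases hd : v.dropLast.getLast? with _ | d
      · simp [hw, pvRewrite, pvRules, PySem.List.slice_to_neg_one,
          PySem.List.pyGet?_neg_one, take_sub_one, hd]
      · simp [hw, pvRewrite, pvRules, PySem.List.slice_to_neg_one,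
          PySem.List.pyGet?_neg_one, take_sub_one, hd, pvOr, pvJoin]
    · have hw : PySem.Chars.endswith v ['^'] = false := by simp [endswith_singleton, hl, hc]
      by_cases he : a = 'e'
      · subst he
        have hwe : PySem.Chars.endswith v ['e'] = true := by simp [endswith_singleton, hl]
        have hnn : v.dropLast ≠ [] := dropLast_ne_nil v 'e' hl h2
        have h2s : v.dropLast ++ ['e','s'] = v ++ ['s'] := by
          conv_rhs => rw [← hvd]
          simp
        simp [hw, hwe, pvRewrite, pvRules, PySem.List.slice_to_neg_one,
          take_sub_one, pvOr, pvJoin, hnn, h2s]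
      · have hwe : PySem.Chars.endswith v ['e'] = false := by simp [endswith_singleton, hl, he]
        simp only [slice_two_ch, slice_two_sh]
        by_cases hsib : (a = 's' ∨ a = 'x' ∨ a = 'z')
            ∨ PySem.Chars.endswith v ['c','h'] = true
            ∨ PySem.Chars.endswith v ['s','h'] = true
        · have hdisj : a = 's' ∨ a = 'x' ∨ a = 'z'
              ∨ PySem.Chars.endswith v ['c','h'] = true
              ∨ PySem.Chars.endswith v ['s','h'] = true := by tauto
          rcases hdisj with rfl | rfl | rfl | hch | hsh
          · have hws : PySem.Chars.endswith v ['s'] = true := by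
              simp [endswith_singleton, hl]
            have h2s : v.dropLast ++ ['s','e','s'] = v ++ ['e','s'] := by
              conv_rhs => rw [← hvd]
              simp
            simp [endswith_singleton, hl, hw, hwe, hws, pvRewrite, pvRules, take_sub_one, pvOr, pvJoin, h2s]
          · have hws : PySem.Chars.endswith v ['s'] = false := by
              simp [endswith_singleton, hl]
            have hwx : PySem.Chars.endswith v ['x'] = true := by
              simp [endswith_singleton, hl]
            have h2s : v.dropLast ++ ['x','e','s'] = v ++ ['e','s'] := by
              conv_rhs => rw [← hvd]
              simp
            simp [endswith_singleton, hl, hw, hwe, hws, hwx, pvRewrite, pvRules, take_sub_one, pvOr, pvJoin, h2s]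
          · have hws : PySem.Chars.endswith v ['s'] = false := by
              simp [endswith_singleton, hl]
            have hwx : PySem.Chars.endswith v ['x'] = false := by
              simp [endswith_singleton, hl]
            have hwz : PySem.Chars.endswith v ['z'] = true := by
              simp [endswith_singleton, hl]
            have h2s : v.dropLast ++ ['z','e','s'] = v ++ ['e','s'] := by
              conv_rhs => rw [← hvd]
              simp
            simp [endswith_singleton, hl, hw, hwe, hws, hwx, hwz, pvRewrite, pvRules, take_sub_one, pvOr, pvJoin, h2s]
          · have hh : a = 'h' := by
              have h' := getLast?_of_endswith2 v 'c' 'h' hch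
              rw [hl] at h'; exact Option.some.inj h'
            subst hh
            have hws : PySem.Chars.endswith v ['s'] = false := by
              simp [endswith_singleton, hl]
            have hwx : PySem.Chars.endswith v ['x'] = false := by
              simp [endswith_singleton, hl]
            have hwz : PySem.Chars.endswith v ['z'] = false := by
              simp [endswith_singleton, hl]
            have h2s : v.take (v.length - 2) ++ ['c','h','e','s'] = v ++ ['e','s'] := by
              simpa using take_endswith v ['c','h'] ['e','s'] ((endswith_suffix_iff _ _).mp hch)
            simp [endswith_singleton, hl, hw, hwe, hws, hwx, hwz, hch, pvRewrite, pvRules, pvOr, pvJoin,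
              h2s, List.append_assoc]
          · have hh : a = 'h' := by
              have h' := getLast?_of_endswith2 v 's' 'h' hsh
              rw [hl] at h'; exact Option.some.inj h'
            subst hh
            have hch2 : PySem.Chars.endswith v ['c','h'] = false := by
              rcases h : PySem.Chars.endswith v ['c','h'] with _ | _
              · rfl
              · exfalso
                have d1 := (drop_sub_two_eq_iff v ['c','h'] rfl).mpr ((endswith_suffix_iff _ _).mp h)
                have d2 := (drop_sub_two_eq_iff v ['s','h'] rfl).mpr ((endswith_suffix_iff _ _).mp hsh)
                rw [d1] at d2; simp at d2
            have hws : PySem.Chars.endswith v ['s'] = false := by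
              simp [endswith_singleton, hl]
            have hwx : PySem.Chars.endswith v ['x'] = false := by
              simp [endswith_singleton, hl]
            have hwz : PySem.Chars.endswith v ['z'] = false := by
              simp [endswith_singleton, hl]
            have h2s : v.take (v.length - 2) ++ ['s','h','e','s'] = v ++ ['e','s'] := by
              simpa using take_endswith v ['s','h'] ['e','s'] ((endswith_suffix_iff _ _).mp hsh)
            simp [endswith_singleton, hl, hw, hwe, hws, hwx, hwz, hch2, hsh, pvRewrite, pvRules, pvOr, pvJoin,
              h2s, List.append_assoc]
        · have hch : PySem.Chars.endswith v ['c','h'] = false := by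
            rcases h : PySem.Chars.endswith v ['c','h'] with _ | _
            · rfl
            · exact absurd (Or.inr (Or.inl h)) hsib
          have hsh : PySem.Chars.endswith v ['s','h'] = false := by
            rcases h : PySem.Chars.endswith v ['s','h'] with _ | _
            · rfl
            · exact absurd (Or.inr (Or.inr h)) hsib
          have hs1 : ¬ a = 's' := fun h => hsib (Or.inl (Or.inl h))
          have hs2 : ¬ a = 'x' := fun h => hsib (Or.inl (Or.inr (Or.inl h)))
          have hs3 : ¬ a = 'z' := fun h => hsib (Or.inl (Or.inr (Or.inr h)))
          have hws : PySem.Chars.endswith v ['s'] = false := by simp [endswith_singleton, hl, hs1]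
          have hwx : PySem.Chars.endswith v ['x'] = false := by simp [endswith_singleton, hl, hs2]
          have hwz : PySem.Chars.endswith v ['z'] = false := by simp [endswith_singleton, hl, hs3]
          by_cases hy : a = 'y'
          · subst hy
            have hwy : PySem.Chars.endswith v ['y'] = true := by
              simp [endswith_singleton, hl]
            simp [hw, hwe, hws, hwx, hwz, hch, hsh, hwy, hs1, hs2, hs3, hc, he,
              pvRewrite, pvRules, take_sub_one, pvOr, pvJoin,
              PySem.List.slice_to_neg_one, List.append_assoc]
          · have hwy : PySem.Chars.endswith v ['y'] = false := by simp [endswith_singleton, hl, hy]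
            simp [hw, hwe, hws, hwx, hwz, hch, hsh, hwy, hs1, hs2, hs3, hc, he, hy,
              pvRewrite, pvRules, pvOr, pvJoin]

lemma head?_join_cons (a : List Char) (ws : List (List Char)) (c : Char) (t : List Char)
    (h : a = c :: t) : (PySem.Chars.join [' '] (a :: ws)).head? = some c := by
  cases ws with
  | nil => rw [PySem.Chars.join_singleton, h]; rfl
  | cons w ws => rw [PySem.Chars.join_cons_cons]; subst h; simp

lemma diff_on_e (s : String) (ws : List (List Char))
    (hs : PySem.Chars.split₀ s.toList = ['e'] :: ws) : verb_forms s ≠ verb_forms_alt s := by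
  intro h
  have h3 := congrArg (fun t => t.2.2.1) h
  have hA : (verb_forms s).2.2.1 = String.ofList (PySem.Chars.join [' '] (['e','i','n','g'] :: ws)) := by
    unfold verb_forms
    rw [hs]
    simp [PySem.List.pyGet?, PySem.List.pyIdx?, PySem.List.slice, pvOr, pvJoin]
  have hB : (verb_forms_alt s).2.2.1 = String.ofList (PySem.Chars.join [' '] (['i','n','g'] :: ws)) := by
    unfold verb_forms_alt
    rw [hs]
    simp [pvRewrite, pvRules, PySem.Chars.endswith, List.isSuffixOf, pvJoin]
  simp only [hA, hB] at h3
  have h4 := congrArg String.toList h3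
  rw [String.toList_ofList, String.toList_ofList] at h4
  have h5 := congrArg List.head? h4
  rw [head?_join_cons _ _ 'e' ['i','n','g'] rfl, head?_join_cons _ _ 'i' ['n','g'] rfl] at h5
  simp at h5

-- ===== VERDICT (by name: the statement is the Claim_ definition above) =====
theorem verb_forms_spec : Claim_unchanged_verb_forms := by
  intro s _ hpre hnd
  obtain ⟨hne, hhd⟩ := hpre
  rcases hE : PySem.Chars.split₀ s.toList with _ | ⟨v, ws⟩
  · exact absurd hE hne
  · exact core s v ws hE (fun h => hnd (by unfold D_verb_forms; rw [hE, h]; rfl))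

theorem verb_forms_changed : Claim_changed_verb_forms := by
  unfold Claim_changed_verb_forms; decide

theorem verb_forms_tight : Claim_exact_verb_forms := by
  intro s _ hpre hd
  obtain ⟨hne, _⟩ := hpre
  rcases hE : PySem.Chars.split₀ s.toList with _ | ⟨v, ws⟩
  · exact absurd hE hne
  · have hv : v = ['e'] := by
      have := hd; unfold D_verb_forms at this; rw [hE] at this; exact this
    exact diff_on_e s ws (by rw [hE, hv])
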